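-- pv_equiv track=rewrite | github.com/UKGANG/Leetcode | hash/ComplementaryPairs.py | complementaryPairs
-- ===== SOURCE A (Python) =====
-- import collections
-- from typing import List
--
-- def complementaryPairs(words: List[str]) -> List[List[int]]:
--     def hashcode(word: str) -> int:
--         code = 0
--         for c in word:
--             code ^= 1 << (ord(c) - ord('a'))
--         return code
--
--     hashed_count = collections.Counter()
--     for word in words:
--         hashed_count[hashcode(word)] += 1
--
--     res_1 = 0
--     for k, v in hashed_count.items():
--         if v > 1:
--             res_1 += v * (v - 1)
--     res_2 = 0
--     for k, v in hashed_count.items():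
--         for i in range(26):
--             new_k = (1 << i) ^ k
--             if new_k not in hashed_count:
--                 continue
--             res_2 += v * hashed_count[new_k]
--     return (res_1 + res_2) >> 1
-- ===== SOURCE B (Python) =====
-- from typing import List
--
-- def complementaryPairs(words: List[str]) -> int:
--     # one pass: count partners already seen, so no final halving is needed
--     seen = {}
--     res = 0
--     for word in words:
--         m = 0
--         for c in word:
--             m ^= 1 << (ord(c) - ord('a'))
--         res += seen.get(m, 0) + sum(seen.get(m ^ (1 << i), 0) for i in range(26))
--         seen[m] = seen.get(m, 0) + 1
--     return res
-- ===== Notes on version B (the rewrite author's own statement) =====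
-- stated objective: alternative
-- what changed: A builds a full Counter of parity masks, then sums v*(v-1) over equal masks plus an ordered double sum over one-bit-flip mask pairs and halves the total; B makes one pass keeping a dict of masks seen so far, counting each unordered pair once when its second word arrives, with no halving.
import Mathlib
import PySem

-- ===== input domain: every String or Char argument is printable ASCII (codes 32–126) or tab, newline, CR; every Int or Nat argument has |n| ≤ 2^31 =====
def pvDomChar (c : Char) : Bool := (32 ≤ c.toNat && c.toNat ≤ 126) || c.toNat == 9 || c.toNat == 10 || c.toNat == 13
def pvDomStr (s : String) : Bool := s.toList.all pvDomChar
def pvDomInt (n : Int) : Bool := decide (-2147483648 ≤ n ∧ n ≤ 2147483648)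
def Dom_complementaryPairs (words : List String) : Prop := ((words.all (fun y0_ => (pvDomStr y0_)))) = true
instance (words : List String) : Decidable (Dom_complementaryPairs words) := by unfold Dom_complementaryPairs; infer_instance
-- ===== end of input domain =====

-- B replaces A's Counter-then-double-sum-then-halve with one pass over the words that counts each
-- complementary pair once, when its second word arrives (objective: alternative decomposition).

-- ===== PORT A =====
def pvHashcode (word : String) : Nat :=
  word.toList.foldl (fun code c => code ^^^ (1 <<< (c.toNat - 97))) 0

def complementaryPairs (words : List String) : Int :=
  let hashed_count : PySem.Dict Nat Int :=
    words.foldl (fun d w => d.modify (pvHashcode w) 0 (fun v => v + 1)) PySem.Dict.empty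
  let res_1 : Int :=
    hashed_count.items.foldl (fun r kv => if kv.2 > 1 then r + kv.2 * (kv.2 - 1) else r) 0
  let res_2 : Int :=
    hashed_count.items.foldl (fun r kv =>
      (PySem.List.pyRange 0 26 1).foldl (fun r i =>
        if hashed_count.contains ((1 <<< i.toNat) ^^^ kv.1)
        then r + kv.2 * hashed_count.getD ((1 <<< i.toNat) ^^^ kv.1) 0 else r) r) 0
  (res_1 + res_2) >>> (1 : Int)

-- ===== PORT B =====
def complementaryPairs_alt (words : List String) : Int :=
  (words.foldl (fun (st : PySem.Dict Nat Int × Int) word =>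
      let seen := st.1
      let m := word.toList.foldl (fun m c => m ^^^ (1 <<< (c.toNat - 97))) 0
      let r := st.2 + (seen.getD m 0 +
        ((PySem.List.pyRange 0 26 1).map (fun i => seen.getD (m ^^^ (1 <<< i.toNat)) 0)).sum)
      (seen.insert m (seen.getD m 0 + 1), r))
    (PySem.Dict.empty, 0)).2

-- ===== PRECONDITION & SPEC =====
-- Pre_ excludes exactly the inputs on which Python A raises ValueError ('negative shift count'):
-- any word containing a character with code below ord('a') = 97 (B raises there too).
def Pre_complementaryPairs (words : List String) : Prop :=
  (words.all (fun w => w.toList.all (fun c => 97 ≤ c.toNat))) = true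
instance (words : List String) : Decidable (Pre_complementaryPairs words) := by
  unfold Pre_complementaryPairs; infer_instance
def pvWitness_complementaryPairs : List String := []

def Spec_complementaryPairs (words : List String) (out : Int) : Prop := out = complementaryPairs_alt words
instance (words : List String) (out : Int) : Decidable (Spec_complementaryPairs words out) := by
  unfold Spec_complementaryPairs; infer_instance

-- ===== CLAIM (what is proved, stated in full; the proofs are below) =====
def Claim_equal_complementaryPairs : Prop := ∀ (words : List String), Dom_complementaryPairs words → Pre_complementaryPairs words → Spec_complementaryPairs words (complementaryPairs words)

-- ===== LEMMAS AND PROOFS =====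

-- the 27 masks complementary to m: m itself and m with one of the 26 letter bits flipped
def pvKey27 (m : Nat) : List Nat := m :: (List.range 26).map (fun i => m ^^^ (1 <<< i))

-- "y is a complementary partner of m"
def pvRelb (m y : Nat) : Bool := decide (y ∈ pvKey27 m)

-- number of unordered complementary pairs (i < j), counted head-against-tail
def pvPairCount : List Nat → Int
  | [] => 0
  | x :: t => (t.countP (pvRelb x) : Int) + pvPairCount t

theorem pvXorLeftCancel {a b c : Nat} (h : a ^^^ b = a ^^^ c) : b = c := by
  have := congrArg (fun z => a ^^^ z) h
  simpa [← Nat.xor_assoc, Nat.xor_self, Nat.zero_xor] using this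

theorem pvNodupKey27 (m : Nat) : (pvKey27 m).Nodup := by
  unfold pvKey27
  refine List.nodup_cons.mpr ⟨?_, ?_⟩
  · intro hm
    rcases List.mem_map.mp hm with ⟨i, _, hi⟩
    have h0 : m ^^^ (1 <<< i) = m ^^^ 0 := by simpa [Nat.xor_zero] using hi
    have : (1 <<< i : Nat) = 0 := pvXorLeftCancel h0
    simp [Nat.shiftLeft_eq] at this
  · refine List.Nodup.map_on ?_ (List.nodup_range)
    intro i hi j hj hij
    have h2 : (1 <<< i : Nat) = 1 <<< j := pvXorLeftCancel hij
    simpa [Nat.shiftLeft_eq] using h2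

theorem pvRelbRefl (m : Nat) : pvRelb m m = true := by
  simp [pvRelb, pvKey27]

theorem pvRelbSymm (x y : Nat) : pvRelb x y = pvRelb y x := by
  have key : ∀ a b : Nat, b ∈ pvKey27 a → a ∈ pvKey27 b := by
    intro a b hb
    unfold pvKey27 at *
    rcases List.mem_cons.mp hb with h | h
    · simp [h]
    · rcases List.mem_map.mp h with ⟨i, hi, hxi⟩
      refine List.mem_cons.mpr (Or.inr (List.mem_map.mpr ⟨i, hi, ?_⟩))
      subst hxi
      simp
  unfold pvRelb
  by_cases h : y ∈ pvKey27 x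
  · simp [h, key x y h]
  · by_cases h2 : x ∈ pvKey27 y
    · exact absurd (key y x h2) h
    · simp [h, h2]

theorem pvSumBoole {α : Type} (l : List α) (p : α → Bool) :
    (l.map (fun x => if p x then (1 : Int) else 0)).sum = (l.countP p : Int) := by
  induction l with
  | nil => simp
  | cons a t ih => by_cases h : p a <;> simp [List.countP_cons, h, ih] <;> ring

theorem pvCountPMemCons {v : Nat} {vs : List Nat} (hv : v ∉ vs) (ms : List Nat) :
    ms.countP (fun y => decide (y ∈ v :: vs)) = ms.count v + ms.countP (fun y => decide (y ∈ vs)) := by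
  induction ms with
  | nil => simp
  | cons a t ih =>
    rw [List.countP_cons, List.count_cons, List.countP_cons, ih]
    by_cases h : a = v
    · subst h
      simp [hv]
      omega
    · by_cases h2 : a ∈ vs <;> simp [List.mem_cons, h, h2] <;> omega

theorem pvSumCountEqCountP (vals : List Nat) (h : vals.Nodup) (ms : List Nat) :
    (vals.map (fun v => (ms.count v : Int))).sum = (ms.countP (fun y => decide (y ∈ vals)) : Int) := by
  induction vals with
  | nil => simp
  | cons v vs ih =>
    rcases List.nodup_cons.mp h with ⟨hv, hvs⟩
    rw [List.map_cons, List.sum_cons, ih hvs, pvCountPMemCons hv]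
    push_cast
    ring

theorem pvFoldlIteAdd {α : Type} (p : α → Prop) [DecidablePred p] (g : α → Int) (l : List α) (a : Int) :
    l.foldl (fun r x => if p x then r + g x else r) a
      = a + (l.map (fun x => if p x then g x else 0)).sum := by
  induction l generalizing a with
  | nil => simp
  | cons x t ih => by_cases h : p x <;> simp [h, ih] <;> ring

theorem pvSumIteEq {l : List Nat} (hl : l.Nodup) {a : Nat} (ha : a ∈ l) (g : Nat → Int) :
    (l.map (fun k => if k = a then g k else 0)).sum = g a := by
  induction l with
  | nil => simp at ha
  | cons x t ih =>
    rcases List.nodup_cons.mp hl with ⟨hx, ht⟩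
    rcases List.mem_cons.mp ha with h | h
    · rw [List.map_cons, List.sum_cons, if_pos h.symm]
      have hz : (t.map (fun k => if k = a then g k else 0)).sum = 0 := by
        apply List.sum_eq_zero
        intro y hy
        rcases List.mem_map.mp hy with ⟨k, hk, rfl⟩
        have hkx : ¬ (k = a) := fun e => hx ((h.symm.trans e.symm) ▸ hk)
        simp [hkx]
      rw [hz, ← h]; ring
    · have hxa : x ≠ a := fun e => hx (e ▸ h)
      simp [List.map_cons, hxa, ih ht h]

theorem pvSumMulCount (l : List Nat) (hl : l.Nodup) (g : Nat → Int) :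
    ∀ ms : List Nat, (∀ x ∈ ms, x ∈ l) →
      (l.map (fun k => (ms.count k : Int) * g k)).sum = (ms.map g).sum := by
  intro ms
  induction ms with
  | nil => simp
  | cons a t ih =>
    intro hmem
    have ha : a ∈ l := hmem a (List.mem_cons_self)
    have ht : ∀ x ∈ t, x ∈ l := fun x hx => hmem x (List.mem_cons_of_mem _ hx)
    have step : ∀ k : Nat, ((a :: t).count k : Int) * g k
        = (t.count k : Int) * g k + (if k = a then g k else 0) := by
      intro k
      by_cases h : k = a
      · subst h; simp [List.count_cons]; push_cast; ring
      · have h' : ¬ (a = k) := fun e => h e.symm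
        simp [List.count_cons, h, h']
    calc (l.map (fun k => ((a :: t).count k : Int) * g k)).sum
        = (l.map (fun k => (t.count k : Int) * g k + (if k = a then g k else 0))).sum := by
          simp only [step]
      _ = (l.map (fun k => (t.count k : Int) * g k)).sum
          + (l.map (fun k => if k = a then g k else 0)).sum := List.sum_map_add
      _ = (t.map g).sum + g a := by rw [ih ht, pvSumIteEq hl ha]
      _ = ((a :: t).map g).sum := by simp; ring

theorem pvSumCountPSubOne (ms : List Nat) :
    (ms.map (fun x => (ms.countP (pvRelb x) : Int) - 1)).sum = 2 * pvPairCount ms := by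
  induction ms with
  | nil => simp [pvPairCount]
  | cons a t ih =>
    have hcountswap : t.countP (fun x => pvRelb x a) = t.countP (pvRelb a) :=
      List.countP_congr (fun x _ => by rw [pvRelbSymm])
    calc ((a :: t).map (fun x => ((a :: t).countP (pvRelb x) : Int) - 1)).sum
        = (((a :: t).countP (pvRelb a) : Int) - 1)
          + (t.map (fun x => ((a :: t).countP (pvRelb x) : Int) - 1)).sum := by
          rw [List.map_cons, List.sum_cons]
      _ = ((t.countP (pvRelb a) : Int) + 1 - 1)
          + (t.map (fun x => ((t.countP (pvRelb x) : Int) - 1)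
              + (if pvRelb x a then (1:Int) else 0))).sum := by
          rw [List.countP_cons, pvRelbRefl]
          have hmap : (t.map (fun x => (((a :: t).countP (pvRelb x) : Int)) - 1))
              = t.map (fun x => ((t.countP (pvRelb x) : Int) - 1)
                  + (if pvRelb x a then (1:Int) else 0)) := by
            apply List.map_congr_left
            intro x _
            rw [List.countP_cons]
            by_cases h : pvRelb x a <;> simp [h] <;> push_cast <;> ring
          rw [hmap]
          push_cast; norm_num
      _ = (t.countP (pvRelb a) : Int)
          + ((t.map (fun x => (t.countP (pvRelb x) : Int) - 1)).sum
             + (t.map (fun x => if pvRelb x a then (1:Int) else 0)).sum) := by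
          rw [List.sum_map_add]; ring
      _ = (t.countP (pvRelb a) : Int) + (2 * pvPairCount t + (t.countP (pvRelb a) : Int)) := by
          rw [ih, pvSumBoole, hcountswap]
      _ = 2 * pvPairCount (a :: t) := by
          show _ = 2 * ((t.countP (pvRelb a) : Int) + pvPairCount t)
          ring

theorem pvPairCountAppend (ms : List Nat) (m : Nat) :
    pvPairCount (ms ++ [m]) = pvPairCount ms + (ms.countP (pvRelb m) : Int) := by
  induction ms with
  | nil => simp [pvPairCount]
  | cons a t ih =>
    show (((t ++ [m]).countP (pvRelb a) : Int)) + pvPairCount (t ++ [m]) = _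
    rw [List.countP_append, ih]
    show _ = ((t.countP (pvRelb a) : Int) + pvPairCount t) + (((a :: t).countP (pvRelb m)) : Int)
    rw [List.countP_cons, List.countP_cons, pvRelbSymm m a]
    by_cases h : pvRelb a m <;> simp [h] <;> push_cast <;> ring

theorem pvPyRange26 : PySem.List.pyRange 0 26 1 = (List.range 26).map (Nat.cast : Nat → Int) := by
  simpa using PySem.List.pyRange_zero_natCast 26

theorem pvShiftRightOne (n : Int) : (2 * n) >>> (1 : Int) = n := by
  have h1 : ((1 : Nat) : Int) = (1 : Int) := rfl
  rw [← h1, Int.shiftRight_natCast_right, Int.shiftRight_eq_div_pow]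
  omega

theorem pvKey27Sum (ms : List Nat) (m : Nat) :
    ((pvKey27 m).map (fun v => (ms.count v : Int))).sum = (ms.countP (pvRelb m) : Int) := by
  rw [pvSumCountEqCountP _ (pvNodupKey27 m)]
  rfl

theorem pvAltFoldl (words : List String) :
    (words.foldl (fun (st : PySem.Dict Nat Int × Int) word =>
      let seen := st.1
      let m := word.toList.foldl (fun m c => m ^^^ (1 <<< (c.toNat - 97))) 0
      let r := st.2 + (seen.getD m 0 +
        ((PySem.List.pyRange 0 26 1).map (fun i => seen.getD (m ^^^ (1 <<< i.toNat)) 0)).sum)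
      (seen.insert m (seen.getD m 0 + 1), r))
    (PySem.Dict.empty, 0))
    = (PySem.Dict.counter (words.map pvHashcode), pvPairCount (words.map pvHashcode)) := by
  induction words using List.reverseRecOn with
  | nil =>
    rw [PySem.Dict.counter_eq_foldl]
    simp [pvPairCount]
  | append_singleton ws w ih =>
    rw [List.foldl_append, ih, List.map_append]
    simp only [List.foldl_cons, List.foldl_nil, List.map_cons, List.map_nil]
    have hm : (w.toList.foldl (fun m c => m ^^^ (1 <<< (c.toNat - 97))) 0) = pvHashcode w := rfl
    have hfst : (PySem.Dict.counter (ws.map pvHashcode)).insert (pvHashcode w)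
          ((PySem.Dict.counter (ws.map pvHashcode)).getD (pvHashcode w) 0 + 1)
        = PySem.Dict.counter (ws.map pvHashcode ++ [pvHashcode w]) := by
      rw [← PySem.Dict.foldl_insert_getD_add_one_eq_counter,
          ← PySem.Dict.foldl_insert_getD_add_one_eq_counter, List.foldl_append]
      simp
    have hsum : (PySem.Dict.counter (ws.map pvHashcode)).getD (pvHashcode w) 0 +
          ((PySem.List.pyRange 0 26 1).map (fun i =>
            (PySem.Dict.counter (ws.map pvHashcode)).getD (pvHashcode w ^^^ (1 <<< i.toNat)) 0)).sum
        = ((ws.map pvHashcode).countP (pvRelb (pvHashcode w)) : Int) := by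
      have hlist : ((PySem.List.pyRange 0 26 1).map (fun i =>
            (PySem.Dict.counter (ws.map pvHashcode)).getD (pvHashcode w ^^^ (1 <<< i.toNat)) 0))
          = (List.range 26).map (fun i =>
              ((ws.map pvHashcode).count (pvHashcode w ^^^ (1 <<< i)) : Int)) := by
        rw [pvPyRange26, List.map_map]
        apply List.map_congr_left
        intro i _
        simp [PySem.Dict.getD_counter]
      rw [hlist, PySem.Dict.getD_counter, ← pvKey27Sum (ws.map pvHashcode) (pvHashcode w)]
      unfold pvKey27
      rw [List.map_cons, List.sum_cons, List.map_map]
      rfl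
    rw [Prod.mk.injEq]
    constructor
    · rw [hm, hfst]
    · rw [hm, hsum, pvPairCountAppend]

theorem pvInnerFold (ms : List Nat) (k : Nat) (c r : Int) :
    (PySem.List.pyRange 0 26 1).foldl (fun r i =>
        if (PySem.Dict.counter ms).contains ((1 <<< i.toNat) ^^^ k)
        then r + c * (PySem.Dict.counter ms).getD ((1 <<< i.toNat) ^^^ k) 0 else r) r
    = r + c * (((List.range 26).map (fun i => (ms.count (k ^^^ (1 <<< i)) : Int))).sum) := by
  rw [pvPyRange26, List.foldl_map,
      pvFoldlIteAdd (fun i : Nat => (PySem.Dict.counter ms).contains ((1 <<< ((i:Int)).toNat) ^^^ k) = true)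
        (fun i : Nat => c * (PySem.Dict.counter ms).getD ((1 <<< ((i:Int)).toNat) ^^^ k) 0)
        (List.range 26) r]
  congr 1
  rw [← List.sum_map_mul_left]
  apply congrArg List.sum
  apply List.map_congr_left
  intro i _
  rw [PySem.Dict.contains_counter]
  by_cases h : ((1 <<< i) ^^^ k) ∈ ms
  · have hc : ms.contains ((1 <<< ((i:Int)).toNat) ^^^ k) = true := by
      simpa [List.contains_iff_mem] using h
    rw [if_pos hc, PySem.Dict.getD_counter]
    rw [Nat.xor_comm k (1 <<< i)]
    simp
  · have hc : ¬ (ms.contains ((1 <<< ((i:Int)).toNat) ^^^ k) = true) := by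
      simpa [List.contains_iff_mem] using h
    rw [if_neg hc]
    have : ms.count (k ^^^ (1 <<< i)) = 0 := by
      rw [Nat.xor_comm k (1 <<< i)]
      exact List.count_eq_zero.mpr h
    rw [this]
    simp

theorem pvAeq (words : List String) : complementaryPairs words = complementaryPairs_alt words := by
  have hB : complementaryPairs_alt words = pvPairCount (words.map pvHashcode) := by
    unfold complementaryPairs_alt
    rw [pvAltFoldl]
  rw [hB]
  have hd : (words.foldl (fun d w => d.modify (pvHashcode w) 0 (fun v => v + 1)) PySem.Dict.empty)
      = PySem.Dict.counter (words.map pvHashcode) := by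
    rw [PySem.Dict.counter_eq_foldl, List.foldl_map]
  simp only [complementaryPairs]
  rw [hd]
  set ms := words.map pvHashcode with hms
  rw [PySem.Dict.items_counter, List.foldl_map, List.foldl_map]
  rw [pvFoldlIteAdd (fun k : Nat => ((ms.count k : Int) > 1))
        (fun k : Nat => (ms.count k : Int) * ((ms.count k : Int) - 1)) (PySem.Set.ofList ms) 0]
  simp only [pvInnerFold]
  rw [PySem.List.foldl_add]
  rw [zero_add, zero_add, ← List.sum_map_add]
  have hpt : ((PySem.Set.ofList ms).map (fun k =>
        (if (ms.count k : Int) > 1 then (ms.count k : Int) * ((ms.count k : Int) - 1) else 0)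
        + (ms.count k : Int) * (((List.range 26).map (fun i => (ms.count (k ^^^ (1 <<< i)) : Int))).sum)))
      = (PySem.Set.ofList ms).map (fun k => (ms.count k : Int) * ((ms.countP (pvRelb k) : Int) - 1)) := by
    apply List.map_congr_left
    intro k hk
    have hkm : k ∈ ms := (PySem.Set.mem_ofList ms k).mp hk
    have h1 : 0 < ms.count k := List.count_pos_iff.mpr hkm
    have hsum : (ms.count k : Int)
          + ((List.range 26).map (fun i => (ms.count (k ^^^ (1 <<< i)) : Int))).sum
        = ((ms.countP (pvRelb k)) : Int) := by
      rw [← pvKey27Sum ms k]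
      unfold pvKey27
      rw [List.map_cons, List.sum_cons, List.map_map]
      rfl
    rw [← hsum]
    by_cases hcnt : (ms.count k : Int) > 1
    · rw [if_pos hcnt]; ring
    · have hone : (ms.count k : Int) = 1 := by
        have := h1
        omega
      rw [if_neg hcnt, hone]
      ring
  rw [hpt, pvSumMulCount (PySem.Set.ofList ms) (PySem.Set.nodup_ofList ms) _ ms
        (fun x hx => (PySem.Set.mem_ofList ms x).mpr hx),
      pvSumCountPSubOne, pvShiftRightOne]

-- ===== VERDICT (by name: the statement is the Claim_ definition above) =====
theorem complementaryPairs_spec : Claim_equal_complementaryPairs := by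
  intro words _ _
  unfold Spec_complementaryPairs
  exact pvAeq words
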